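-- pv_equiv track=rewrite | github.com/FrancescBellido/TFG_NarrativaDigital | RenpyProject/server.py | isAllStringEqual
-- ===== SOURCE A (Python) =====
-- def isAllStringEqual(stri):
--
--     characters = {""}
--
--     for c in stri:
--         encontrado = False
--         for chVector in characters:
--             if chVector == c:
--                 encontrado = True
--         if encontrado == False:
--             characters.add(c)
--
--     return len(characters) <= 3
-- ===== SOURCE B (Python) =====
-- def isAllStringEqual(stri):
--     s = sorted(stri)
--     distinct = 0
--     prev = None
--     for ch in s:
--         if prev != ch:
--             distinct += 1
--         prev = ch
--     return distinct <= 2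
-- ===== Notes on version B (the rewrite author's own statement) =====
-- stated objective: faster
-- what changed: Replaces the set-with-inner-membership-scan (seeded with a dummy empty string, threshold 3) by sort-then-one-pass counting of adjacent equal-character groups, returning distinct <= 2.
import Mathlib
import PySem

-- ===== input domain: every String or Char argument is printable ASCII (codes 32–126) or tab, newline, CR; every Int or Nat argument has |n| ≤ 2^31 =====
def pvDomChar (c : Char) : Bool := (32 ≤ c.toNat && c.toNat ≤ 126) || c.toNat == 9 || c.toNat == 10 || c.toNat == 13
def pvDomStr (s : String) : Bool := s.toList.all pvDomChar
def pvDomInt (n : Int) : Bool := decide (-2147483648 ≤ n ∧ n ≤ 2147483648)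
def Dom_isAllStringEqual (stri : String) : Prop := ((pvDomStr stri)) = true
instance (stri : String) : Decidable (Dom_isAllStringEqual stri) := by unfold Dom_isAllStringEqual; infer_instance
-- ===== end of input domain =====

-- B replaces A's set with an inner membership scan by sort-then-one-pass group counting (alternative decomposition, same result).

-- ===== PORT A =====
-- characters : set of strings seeded with ""; the inner for-loop scans the whole set for c.
def isAllStringEqual (stri : String) : Bool :=
  let characters : PySem.Set String :=
    stri.toList.foldl (fun chs c =>
      let encontrado := chs.foldl (fun enc chVector => if chVector == String.ofList [c] then true else enc) false
      if encontrado == false then PySem.Set.add chs (String.ofList [c]) else chs)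
      (PySem.Set.ofList [""])
  decide (characters.length ≤ 3)

-- ===== PORT B =====
-- sort the characters, then one pass: count positions whose char differs from the previous one.
def isAllStringEqual_alt (stri : String) : Bool :=
  let s := PySem.List.sorted stri.toList (fun x => x) false
  let st := s.foldl (fun (st : Option Char × Nat) ch =>
      (some ch, if st.1 ≠ some ch then st.2 + 1 else st.2)) (none, 0)
  decide (st.2 ≤ 2)

-- ===== PRECONDITION & SPEC =====
def Spec_isAllStringEqual (stri : String) (out : Bool) : Prop := out = isAllStringEqual_alt stri
instance (stri : String) (out : Bool) : Decidable (Spec_isAllStringEqual stri out) := by unfold Spec_isAllStringEqual; infer_instance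

-- ===== CLAIM (what is proved, stated in full; the proofs are below) =====
def Claim_equal_isAllStringEqual : Prop := ∀ (stri : String), Dom_isAllStringEqual stri → Spec_isAllStringEqual stri (isAllStringEqual stri)

-- ===== LEMMAS AND PROOFS =====

-- A's inner scan of the set is membership
theorem pv_scan_eq_contains (x : String) (l : List String) (b : Bool) :
    l.foldl (fun enc chVector => if chVector == x then true else enc) b = (b || l.contains x) := by
  induction l generalizing b with
  | nil => simp
  | cons y ys ih =>
    simp only [List.foldl_cons, List.contains_cons]
    rw [ih]
    by_cases h : y = x
    · simp [h]
    · have hbeq : (x == y) = false := beq_false_of_ne (fun hxy => h hxy.symm)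
      simp [h, hbeq]

-- A's loop step is exactly Set.add
theorem pv_stepA_eq_add (chs : PySem.Set String) (c : Char) :
    (let encontrado := chs.foldl (fun enc chVector => if chVector == String.ofList [c] then true else enc) false
     if encontrado == false then PySem.Set.add chs (String.ofList [c]) else chs)
    = PySem.Set.add chs (String.ofList [c]) := by
  simp only [pv_scan_eq_contains, Bool.false_or]
  by_cases h : String.ofList [c] ∈ chs
  · simp [h]
  · simp [h]

-- length of a fold of Set.add = card of seeds ∪ elements
theorem pv_len_foldl_add {α : Type} [DecidableEq α] (l : List α) (s : PySem.Set α)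
    (hnd : s.Nodup) :
    (l.foldl (fun t x => PySem.Set.add t x) s).length = (s.toFinset ∪ l.toFinset).card := by
  induction l generalizing s with
  | nil =>
    simp only [List.foldl_nil, List.toFinset_nil, Finset.union_empty]
    exact (List.toFinset_card_of_nodup hnd).symm
  | cons x xs ih =>
    simp only [List.foldl_cons]
    rw [ih (PySem.Set.add s x) (PySem.Set.nodup_add _ _ hnd)]
    have hset : (PySem.Set.add s x).toFinset ∪ xs.toFinset = s.toFinset ∪ (x :: xs).toFinset := by
      ext y
      simp [PySem.Set.mem_add]
      tauto
    rw [hset]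

-- B's group counter as a structural function
def pvG : Option Char → List Char → Nat
  | _, [] => 0
  | p, x :: xs => (if p ≠ some x then 1 else 0) + pvG (some x) xs

theorem pv_B_fold_eq_g (l : List Char) (p : Option Char) (n : Nat) :
    (l.foldl (fun (st : Option Char × Nat) ch =>
      (some ch, if st.1 ≠ some ch then st.2 + 1 else st.2)) (p, n)).2 = n + pvG p l := by
  induction l generalizing p n with
  | nil => simp [pvG]
  | cons x xs ih =>
    simp only [List.foldl_cons, pvG]
    rw [ih]
    by_cases h : p = some x <;> simp [h] <;> omega

-- on a sorted list the group counter is the number of distinct elements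
theorem pv_g_sorted (l : List Char) (hs : l.Pairwise (· ≤ ·)) :
    (∀ (a : Char), (∀ y ∈ l, a ≤ y) → pvG (some a) l = (l.toFinset.erase a).card)
    ∧ pvG none l = l.toFinset.card := by
  induction l with
  | nil => simp [pvG]
  | cons x xs ih =>
    have hs' : xs.Pairwise (· ≤ ·) := hs.of_cons
    have hx : ∀ y ∈ xs, x ≤ y := fun y hy => (List.pairwise_cons.mp hs).1 y hy
    have ihx := (ih hs').1 x hx
    have hins : ∀ (s : Finset Char) (z : Char), (insert z s).card = (s.erase z).card + 1 := by
      intro s z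
      have h1 : insert z s = insert z (s.erase z) := by
        ext y; simp; tauto
      rw [h1, Finset.card_insert_of_notMem (Finset.notMem_erase z s)]
    constructor
    · intro a ha
      by_cases h : a = x
      · rw [h]
        have : pvG (some x) (x :: xs) = pvG (some x) xs := by simp [pvG]
        rw [this, ihx]
        congr 1
        ext y
        simp only [List.toFinset_cons, Finset.mem_erase, Finset.mem_insert, List.mem_toFinset]
        tauto
      · have hax : a ≤ x := ha x (by simp)
        have hnot : a ∉ xs := by
          intro hmem
          exact h (le_antisymm hax (hx a hmem))
        have : pvG (some a) (x :: xs) = 1 + pvG (some x) xs := by simp [pvG, h]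
        rw [this, ihx]
        have herase : ((x :: xs).toFinset.erase a) = insert x xs.toFinset := by
          ext y
          simp only [List.toFinset_cons, Finset.mem_erase, Finset.mem_insert, List.mem_toFinset]
          constructor
          · tauto
          · rintro (rfl | hy)
            · exact ⟨Ne.symm h, Or.inl rfl⟩
            · exact ⟨fun hya => hnot (hya ▸ hy), Or.inr hy⟩
        rw [herase, hins]
        omega
    · have : pvG none (x :: xs) = 1 + pvG (some x) xs := by simp [pvG]
      rw [this, ihx, List.toFinset_cons, hins]
      omega

-- ===== VERDICT (by name: the statement is the Claim_ definition above) =====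
theorem isAllStringEqual_spec : Claim_equal_isAllStringEqual := by
  intro stri _
  unfold Spec_isAllStringEqual isAllStringEqual isAllStringEqual_alt
  show (decide _) = (decide _)
  set l := stri.toList with hl
  -- A side: the loop builds Set.add over the singleton strings
  have hAfold : l.foldl (fun chs c =>
      let encontrado := chs.foldl (fun enc chVector => if chVector == String.ofList [c] then true else enc) false
      if encontrado == false then PySem.Set.add chs (String.ofList [c]) else chs)
      (PySem.Set.ofList [""])
      = (l.map (fun c => String.ofList [c])).foldl (fun t x => PySem.Set.add t x) (PySem.Set.ofList [""]) := by
    rw [List.foldl_map]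
    have : ∀ (cs : List Char) (s : PySem.Set String),
        cs.foldl (fun chs c =>
          let encontrado := chs.foldl (fun enc chVector => if chVector == String.ofList [c] then true else enc) false
          if encontrado == false then PySem.Set.add chs (String.ofList [c]) else chs) s
        = cs.foldl (fun chs c => PySem.Set.add chs (String.ofList [c])) s := by
      intro cs
      induction cs with
      | nil => intro s; rfl
      | cons c cs ih =>
        intro s
        simp only [List.foldl_cons]
        rw [pv_stepA_eq_add s c, ih]
    exact this l _
  have hA : ((l.map (fun c => String.ofList [c])).foldl (fun t x => PySem.Set.add t x)
        (PySem.Set.ofList [""])).length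
      = l.toFinset.card + 1 := by
    rw [pv_len_foldl_add _ _ (PySem.Set.nodup_ofList _)]
    have hofl : (PySem.Set.ofList [""] : PySem.Set String) = [""] := rfl
    have hnotmem : ("" : String) ∉ (l.map (fun c => String.ofList [c])).toFinset := by
      simp only [List.mem_toFinset, List.mem_map]
      rintro ⟨c, _, hc⟩
      have : (String.ofList [c]).toList = ("" : String).toList := congrArg String.toList hc
      simp at this
    have hunion : (PySem.Set.ofList [""] : PySem.Set String).toFinset ∪ (l.map (fun c => String.ofList [c])).toFinset
        = insert "" (l.map (fun c => String.ofList [c])).toFinset := by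
      rw [hofl]; ext y; simp
    rw [hunion, Finset.card_insert_of_notMem hnotmem]
    congr 1
    have hmapto : (l.map (fun c => String.ofList [c])).toFinset
        = l.toFinset.image (fun c => String.ofList [c]) := by
      ext y; simp
    rw [hmapto]
    apply Finset.card_image_of_injective
    intro a b h
    have : (String.ofList [a]).toList = (String.ofList [b]).toList := congrArg String.toList h
    simpa using this
  -- B side: the scan over the sorted list counts the distinct characters
  have hperm : (PySem.List.sorted l (fun x => x) false).Perm l := PySem.List.sorted_perm l _ _
  have hsortfin : (PySem.List.sorted l (fun x => x) false).toFinset = l.toFinset :=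
    List.toFinset_eq_of_perm _ _ hperm
  have hsorted : (PySem.List.sorted l (fun x => x) false).Pairwise (· ≤ ·) := by
    have := PySem.List.sorted_pairwise l (fun x => x) (κ := Char)
    simpa using this
  have hB := (pv_g_sorted (PySem.List.sorted l (fun x => x) false) hsorted).2
  rw [hAfold, hA, pv_B_fold_eq_g, hB, hsortfin]
  simp only [Nat.zero_add]
  by_cases h : l.toFinset.card ≤ 2
  · have h3 : l.toFinset.card + 1 ≤ 3 := by omega
    simp [h, h3]
  · have h3 : ¬ (l.toFinset.card + 1 ≤ 3) := by omega
    simp [h, h3]
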